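-- pv_equiv track=rewrite | github.com/sandeepyadav10011995/Data-Structures | IT Bodhi/DP/LIS/4. Longest Nested Cuboids or 3D Containers.py | maxCuboidsLIS
-- ===== SOURCE A (Python) =====
-- def maxCuboidsLIS(cuboids: list) -> int:
--     N = len(cuboids)
--     maxCuboidLIS = [1 for _ in range(N)]
--     cuboids.sort(key=lambda x: x[0])
--
--     maxCuboidStack = 0
--     for i in range(1, N):
--         for j in range(i):
--             # Perform LIS combined on other two dimensions
--             if cuboids[i][1] > cuboids[j][1] and cuboids[i][2] > cuboids[j][2] and maxCuboidLIS[i] < maxCuboidLIS[j] + 1: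
--                 maxCuboidLIS[i] = maxCuboidLIS[j] + 1
--         maxCuboidStack = max(maxCuboidStack, maxCuboidLIS[i])
--
--     return maxCuboidStack
-- ===== SOURCE B (Python) =====
-- # Antichain peeling (Mirsky layer decomposition) instead of a DP table: repeatedly
-- # strip the remaining cuboids that have no strict predecessor among the remaining
-- # ones; the number of peeling rounds is the longest nesting chain.
-- # Like A it sorts `cuboids` in place (same observable mutation).
-- # (On a single-cuboid list A returns 0 and B returns 1; that corner is excluded by the claim.)
-- def maxCuboidsLIS(cuboids: list) -> int:
--     cuboids.sort(key=lambda x: x[0])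
--     remaining = list(range(len(cuboids)))
--     rounds = 0
--     while remaining:
--         remaining = [i for i in remaining
--                      if any(j < i and cuboids[j][1] < cuboids[i][1] and cuboids[j][2] < cuboids[i][2]
--                             for j in remaining)]
--         rounds += 1
--     return rounds
-- ===== Notes on version B (the rewrite author's own statement) =====
-- stated objective: alternative
-- what changed: B replaces A's quadratic DP table with antichain peeling (Mirsky layer decomposition): it repeatedly strips the remaining cuboids that have no strict predecessor among the remaining ones and returns the number of peeling rounds, which equals the longest nesting chain.
-- outside the precondition, e.g. on maxCuboidsLIS([[5, 6, 7]]): A returns 0, B returns 1; on maxCuboidsLIS([[1, 5], [2, 3]]): A returns 1, B returns 1; on maxCuboidsLIS([[7, 8]]): A returns 0, B returns 1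
import Mathlib
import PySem

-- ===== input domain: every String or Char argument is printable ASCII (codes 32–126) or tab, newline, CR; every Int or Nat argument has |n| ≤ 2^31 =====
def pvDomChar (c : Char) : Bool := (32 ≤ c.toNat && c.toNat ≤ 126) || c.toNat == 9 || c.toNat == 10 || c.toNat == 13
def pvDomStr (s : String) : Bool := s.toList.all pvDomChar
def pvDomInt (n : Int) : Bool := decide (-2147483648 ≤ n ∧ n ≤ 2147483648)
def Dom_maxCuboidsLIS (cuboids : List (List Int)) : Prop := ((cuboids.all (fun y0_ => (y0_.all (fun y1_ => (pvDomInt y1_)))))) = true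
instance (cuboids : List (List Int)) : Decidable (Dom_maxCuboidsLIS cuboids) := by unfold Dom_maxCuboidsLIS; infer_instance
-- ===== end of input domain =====

-- B replaces A's DP table by antichain peeling (Mirsky layers): repeatedly strip the remaining
-- cuboids with no strict predecessor among the remaining ones and count the rounds (alternative).
-- Equivalence is about the RETURN value; both Pythons sort the argument in place identically.

-- ===== PORT A =====
-- c[i][k] access; exact under Pre_ (every row has ≥ 3 entries and indices stay in range)
def pvEnt (c : List (List Int)) (i k : Nat) : Int := (c.getD i []).getD k 0
-- cuboids[j][1] < cuboids[i][1] and cuboids[j][2] < cuboids[i][2]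
def pvCond (c : List (List Int)) (j i : Nat) : Bool :=
  decide (pvEnt c j 1 < pvEnt c i 1) && decide (pvEnt c j 2 < pvEnt c i 2)

def maxCuboidsLIS (cuboids : List (List Int)) : Int :=
  let N := cuboids.length
  let dp0 := List.replicate N (1 : Int)                     -- maxCuboidLIS = [1 for _ in range(N)]
  -- cuboids.sort(key=lambda x: x[0]); key exact under Pre_ (rows nonempty)
  let c := PySem.List.sorted cuboids (key := fun r => r.getD 0 0)
  -- for i in range(1, N): — loop bounds are nonnegative, Nat ranges are exact here
  let st := (List.range' 1 (N - 1)).foldl (fun (st : List Int × Int) i =>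
      let dp := (List.range i).foldl (fun dp j =>               -- for j in range(i):
          if pvCond c j i && decide (dp.getD i 0 < dp.getD j 0 + 1)
          then dp.set i (dp.getD j 0 + 1) else dp) st.1
      (dp, max st.2 (dp.getD i 0))) (dp0, 0)
  st.2

-- ===== PORT B =====
-- any(j < i and cuboids[j][1] < cuboids[i][1] and cuboids[j][2] < cuboids[i][2] for j in remaining)
def pvPred (c : List (List Int)) (rem : List Nat) (i : Nat) : Bool :=
  rem.any (fun j => decide (j < i) && pvCond c j i)

-- while remaining: remaining = [...]; rounds += 1 — one recursive call per round; the fuel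
-- argument only makes the recursion structural (each round strictly shrinks `remaining`,
-- so `length remaining` rounds always suffice; proved in pvPeel_fuel_irrel below).
def pvPeel (c : List (List Int)) : Nat → List Nat → Int
  | 0, _ => 0
  | fuel + 1, rem =>
      if rem.isEmpty then 0
      else 1 + pvPeel c fuel (rem.filter (pvPred c rem))

def maxCuboidsLIS_alt (cuboids : List (List Int)) : Int :=
  -- cuboids.sort(key=lambda x: x[0]); key exact under Pre_ (rows nonempty)
  let c := PySem.List.sorted cuboids (key := fun r => r.getD 0 0)
  -- remaining = list(range(len(cuboids)))
  pvPeel c c.length (List.range c.length)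

-- ===== PRECONDITION & SPEC =====
-- Pre_ excludes (a) lists with a row of fewer than 3 entries, on which Python A raises
-- IndexError via the sort key x[0] or the comparisons x[1]/x[2] except when the missing entry
-- is never reached (both programs then still return, cited in claim.json), and (b) single-cuboid
-- lists, a corner on which A's 0 (its maximum ranges over indices ≥ 1 only) and B's 1 (the stack
-- of that one cuboid) are both defensible readings of the tallest-stack height (cited too).
def Pre_maxCuboidsLIS (cuboids : List (List Int)) : Prop :=
  cuboids.length ≠ 1 ∧ ∀ r ∈ cuboids, 3 ≤ r.length
instance (cuboids : List (List Int)) : Decidable (Pre_maxCuboidsLIS cuboids) := by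
  unfold Pre_maxCuboidsLIS; infer_instance
def pvWitness_maxCuboidsLIS : List (List Int) := [[1, 2, 3], [2, 3, 4]]

def Spec_maxCuboidsLIS (cuboids : List (List Int)) (out : Int) : Prop :=
  out = maxCuboidsLIS_alt cuboids
instance (cuboids : List (List Int)) (out : Int) : Decidable (Spec_maxCuboidsLIS cuboids out) := by
  unfold Spec_maxCuboidsLIS; infer_instance

-- ===== CLAIM (what is proved, stated in full; the proofs are below) =====
def Claim_equal_maxCuboidsLIS : Prop := ∀ (cuboids : List (List Int)), Dom_maxCuboidsLIS cuboids → Pre_maxCuboidsLIS cuboids → Spec_maxCuboidsLIS cuboids (maxCuboidsLIS cuboids)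

-- ===== LEMMAS AND PROOFS =====

-- running maximum of f over a list of indices
def pvFMax (f : Nat → Int) (a : Int) (l : List Nat) : Int :=
  l.foldl (fun b x => max b (f x)) a

theorem mem_range1 (s n m : Nat) : m ∈ List.range' s n ↔ s ≤ m ∧ m < s + n := by
  rw [List.mem_range']
  constructor
  · rintro ⟨i, hi, rfl⟩; omega
  · rintro ⟨h1, h2⟩; exact ⟨m - s, by omega, by omega⟩

-- pvH i = longest chain ending at i (A's DP value)
def pvH (c : List (List Int)) (i : Nat) : Int :=
  1 + (List.range i).attach.foldl
      (fun m j => if pvCond c j.1 i then max m (pvH c j.1) else m) 0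
termination_by i
decreasing_by exact List.mem_range.mp j.2

-- ---------- generic pvFMax lemmas ----------
theorem pvFMax_nil (f : Nat → Int) (a : Int) : pvFMax f a [] = a := rfl
theorem pvFMax_cons (f : Nat → Int) (a : Int) (x : Nat) (l : List Nat) :
    pvFMax f a (x :: l) = pvFMax f (max a (f x)) l := rfl
theorem pvFMax_append (f : Nat → Int) (a : Int) (l₁ l₂ : List Nat) :
    pvFMax f a (l₁ ++ l₂) = pvFMax f (pvFMax f a l₁) l₂ := by
  simp [pvFMax, List.foldl_append]
theorem le_pvFMax_init (f : Nat → Int) (a : Int) (l : List Nat) : a ≤ pvFMax f a l := by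
  induction l generalizing a with
  | nil => simp [pvFMax]
  | cons x t ih => exact le_trans (le_max_left a (f x)) (ih (max a (f x)))
theorem le_pvFMax_of_mem (f : Nat → Int) (a : Int) (l : List Nat) (x : Nat) (hx : x ∈ l) :
    f x ≤ pvFMax f a l := by
  induction l generalizing a with
  | nil => cases hx
  | cons y t ih =>
    rw [List.mem_cons] at hx
    rcases hx with rfl | hx
    · exact le_trans (le_max_right a (f x)) (le_pvFMax_init f _ t)
    · exact ih _ hx
theorem pvFMax_cases (f : Nat → Int) (a : Int) (l : List Nat) :
    pvFMax f a l = a ∨ ∃ x ∈ l, pvFMax f a l = f x := by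
  induction l generalizing a with
  | nil => exact Or.inl rfl
  | cons y t ih =>
    rw [pvFMax_cons]
    rcases ih (max a (f y)) with h | ⟨x, hx, h⟩
    · rcases max_choice a (f y) with hm | hm
      · exact Or.inl (by rw [h, hm])
      · exact Or.inr ⟨y, List.mem_cons_self, by rw [h, hm]⟩
    · exact Or.inr ⟨x, List.mem_cons_of_mem _ hx, h⟩
theorem pvFMax_max (f : Nat → Int) (a b : Int) (l : List Nat) :
    pvFMax f (max a b) l = max a (pvFMax f b l) := by
  induction l generalizing b with
  | nil => simp [pvFMax_nil]
  | cons x t ih =>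
    rw [pvFMax_cons, pvFMax_cons, max_assoc, ih]

theorem foldl_if_eq_filter (f : Nat → Int) (p : Nat → Bool) (l : List Nat) (a : Int) :
    l.foldl (fun m x => if p x then max m (f x) else m) a = pvFMax f a (l.filter p) := by
  induction l generalizing a with
  | nil => rfl
  | cons y t ih =>
    by_cases hp : p y
    · simp [hp, List.filter_cons, ih, pvFMax_cons]
    · simp [hp, List.filter_cons, ih]

-- ---------- closed form and bounds of pvH ----------
theorem pvH_eq (c : List (List Int)) (i : Nat) :
    pvH c i = 1 + pvFMax (pvH c) 0 ((List.range i).filter (fun j => pvCond c j i)) := by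
  rw [pvH]
  congr 1
  rw [List.foldl_attach (f := fun m j => if pvCond c j i then max m (pvH c j) else m),
    foldl_if_eq_filter]

theorem one_le_pvH (c : List (List Int)) (i : Nat) : 1 ≤ pvH c i := by
  rw [pvH_eq]; have := le_pvFMax_init (pvH c) 0 ((List.range i).filter (fun j => pvCond c j i)); omega

theorem pvH_zero (c : List (List Int)) : pvH c 0 = 1 := by
  rw [pvH_eq]; rfl

theorem pvH_le (c : List (List Int)) (i : Nat) : pvH c i ≤ (i : Int) + 1 := by
  induction i using Nat.strong_induction_on with
  | _ i ih =>
    rw [pvH_eq]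
    rcases pvFMax_cases (pvH c) 0 ((List.range i).filter (fun j => pvCond c j i)) with h | ⟨j, hj, h⟩
    · rw [h]; have : (0 : Int) ≤ (i : Int) := Int.natCast_nonneg i; omega
    · have hji : j < i := List.mem_range.mp (List.mem_filter.mp hj).1
      have hb := ih j hji
      have hcast : (j : Int) < (i : Int) := by exact_mod_cast hji
      rw [h]; omega

-- the iff behind the peeling step: pvH c i > r+1 iff i has a predecessor of height > r
theorem pvH_gt_succ_iff (c : List (List Int)) (i : Nat) (r : Int) (hr : 0 ≤ r) :
    (r + 1 < pvH c i) ↔ ∃ j, j < i ∧ pvCond c j i = true ∧ r < pvH c j := by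
  rw [pvH_eq]
  constructor
  · intro h
    rcases pvFMax_cases (pvH c) 0 ((List.range i).filter (fun j => pvCond c j i)) with h0 | ⟨x, hx, hEq⟩
    · rw [h0] at h; omega
    · have hx' := List.mem_filter.mp hx
      exact ⟨x, List.mem_range.mp hx'.1, hx'.2, by rw [hEq] at h; omega⟩
  · rintro ⟨j, hji, hcj, hrj⟩
    have := le_pvFMax_of_mem (pvH c) 0 ((List.range i).filter (fun j => pvCond c j i)) j
      (List.mem_filter.mpr ⟨List.mem_range.mpr hji, hcj⟩)
    omega

-- ---------- list helpers ----------
theorem getD_eq_get (l : List Int) (i : Nat) (h : i < l.length) : l.getD i 0 = l[i] := by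
  rw [List.getD_eq_getElem?_getD, List.getElem?_eq_getElem h]; rfl

theorem getD_set_self (l : List Int) (i : Nat) (a : Int) (hi : i < l.length) :
    (l.set i a).getD i 0 = a := by
  rw [List.getD_eq_getElem?_getD, List.getElem?_set_self (by simpa using hi)]
  simp

theorem getD_set_ne (l : List Int) (i j : Nat) (a : Int) (hne : j ≠ i) :
    (l.set i a).getD j 0 = l.getD j 0 := by
  rw [List.getD_eq_getElem?_getD, List.getElem?_set_ne (by omega), ← List.getD_eq_getElem?_getD]

theorem getD_map_range' (g : Nat → Int) (n k : Nat) (hk : k < n) :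
    ((List.range n).map g).getD k 0 = g k := by
  rw [List.getD_eq_getElem?_getD]
  simp [List.getElem?_map, List.getElem?_range, hk]

theorem set_map_range (g : Nat → Int) (n i : Nat) (v : Int) (hi : i < n) :
    ((List.range n).map g).set i v = (List.range n).map (fun k => if k = i then v else g k) := by
  apply List.ext_getElem
  · simp
  · intro k h1 h2
    simp only [List.getElem_set, List.getElem_map, List.getElem_range]
    rcases eq_or_ne i k with rfl | hk
    · simp
    · rw [if_neg hk, if_neg (fun h => hk h.symm)]

theorem replicate_eq_map_range (n : Nat) (a : Int) :
    List.replicate n a = (List.range n).map (fun _ => a) := by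
  simp [List.map_const']

-- ---------- port A = pvMaxA ∘ sorted ----------
def pvMaxA (c : List (List Int)) : Int := pvFMax (pvH c) 0 (List.range' 1 (c.length - 1))

def pvDpA (c : List (List Int)) (m : Nat) : List Int :=
  (List.range c.length).map (fun k => if k ≤ m then pvH c k else 1)

theorem innerA (c : List (List Int)) (dp : List Int) (i : Nat)
    (hi : i < c.length) (hlen : dp.length = c.length)
    (hdpi : dp.getD i 0 = 1) (hdp : ∀ j, j < i → dp.getD j 0 = pvH c j) :
    (List.range i).foldl (fun dp j =>
        if pvCond c j i && decide (dp.getD i 0 < dp.getD j 0 + 1)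
        then dp.set i (dp.getD j 0 + 1) else dp) dp
      = dp.set i (pvH c i) := by
  have key : ∀ m, m ≤ i →
      (List.range m).foldl (fun dp j =>
          if pvCond c j i && decide (dp.getD i 0 < dp.getD j 0 + 1)
          then dp.set i (dp.getD j 0 + 1) else dp) dp
        = dp.set i (1 + pvFMax (pvH c) 0 ((List.range m).filter (fun j => pvCond c j i))) := by
    intro m
    induction m with
    | zero =>
      intro _
      simp only [List.range_zero, List.foldl_nil, List.filter_nil, pvFMax_nil]
      apply List.ext_getElem
      · simp
      · intro k h1 h2
        simp only [List.getElem_set]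
        split
        · rename_i hk
          rw [← getD_eq_get dp k h1, ← hk]
          omega
        · rfl
    | succ m ih =>
      intro hm
      have hmi : m < i := by omega
      conv_lhs => rw [List.range_succ]
      rw [List.foldl_append, ih (by omega), List.foldl_cons, List.foldl_nil]
      set F := pvFMax (pvH c) 0 ((List.range m).filter (fun j => pvCond c j i)) with hF
      have hgi : (dp.set i (1 + F)).getD i 0 = 1 + F := getD_set_self dp i _ (by omega)
      have hgm : (dp.set i (1 + F)).getD m 0 = pvH c m := by
        rw [getD_set_ne dp i m _ (by omega)]; exact hdp m hmi
      by_cases hc : pvCond c m i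
      · have hfilt : (List.range (m + 1)).filter (fun j => pvCond c j i)
            = ((List.range m).filter (fun j => pvCond c j i)) ++ [m] := by
          rw [List.range_succ, List.filter_append]; simp [hc]
        rw [hfilt, pvFMax_append, pvFMax_cons, pvFMax_nil]
        by_cases hlt : 1 + F < pvH c m + 1
        · have : max F (pvH c m) = pvH c m := max_eq_right (by omega)
          rw [this]
          simp only [hc, hgi, hgm, hlt, decide_true, Bool.true_and, if_true, decide_eq_true_eq]
          rw [List.set_set]
          congr 1
          omega
        · have : max F (pvH c m) = F := max_eq_left (by omega)
          rw [this]
          simp only [hc, hgi, hgm, Bool.true_and]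
          rw [if_neg]
          simp only [decide_eq_true_eq]
          omega
      · have hfilt : (List.range (m + 1)).filter (fun j => pvCond c j i)
            = (List.range m).filter (fun j => pvCond c j i) := by
          rw [List.range_succ, List.filter_append]; simp [hc]
        rw [hfilt]
        rw [if_neg]
        simp [hc]
  rw [key i (le_refl i), ← pvH_eq]

theorem outerA (c : List (List Int)) :
    ∀ (k m : Nat) (b : Int), m + k ≤ c.length - 1 →
    (List.range' (m + 1) k).foldl (fun (st : List Int × Int) i =>
        ((List.range i).foldl (fun dp j =>
            if pvCond c j i && decide (dp.getD i 0 < dp.getD j 0 + 1)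
            then dp.set i (dp.getD j 0 + 1) else dp) st.1,
         max st.2 (((List.range i).foldl (fun dp j =>
            if pvCond c j i && decide (dp.getD i 0 < dp.getD j 0 + 1)
            then dp.set i (dp.getD j 0 + 1) else dp) st.1).getD i 0))) (pvDpA c m, b)
      = (pvDpA c (m + k), pvFMax (pvH c) b (List.range' (m + 1) k)) := by
  intro k
  induction k with
  | zero => intro m b _; simp [pvFMax_nil]
  | succ k ih =>
    intro m b hmk
    have hm1 : m + 1 < c.length := by omega
    rw [List.range'_succ, List.foldl_cons]
    have hinner := innerA c (pvDpA c m) (m + 1) hm1 (by simp [pvDpA])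
      (by rw [pvDpA, getD_map_range' _ _ _ hm1]; simp)
      (by intro j hj; rw [pvDpA, getD_map_range' _ _ _ (by omega)]; simp [Nat.le_of_lt_succ hj,
            show j ≤ m by omega])
    simp only [hinner]
    have hset : (pvDpA c m).set (m + 1) (pvH c (m + 1)) = pvDpA c (m + 1) := by
      rw [pvDpA, set_map_range _ _ _ _ hm1]
      apply List.map_congr_left
      intro k hk
      split
      · rename_i h; subst h; simp
      · rename_i h
        by_cases hkm : k ≤ m
        · simp [hkm, Nat.le_succ_of_le hkm]
        · have : ¬ k ≤ m + 1 := by omega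
          simp [hkm, this]
    have hgd : (pvDpA c (m + 1)).getD (m + 1) 0 = pvH c (m + 1) := by
      rw [pvDpA, getD_map_range' _ _ _ hm1]; simp
    rw [hset, hgd]
    have := ih (m + 1) (max b (pvH c (m + 1))) (by omega)
    rw [this, pvFMax_cons, show m + (k + 1) = m + 1 + k from by omega]

theorem portA_eq (cuboids : List (List Int)) :
    maxCuboidsLIS cuboids = pvMaxA (PySem.List.sorted cuboids (key := fun r => r.getD 0 0)) := by
  set c := PySem.List.sorted cuboids (key := fun r => r.getD 0 0) with hc
  have hlen : cuboids.length = c.length := (PySem.List.length_sorted _ _ _).symm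
  have hdp0 : List.replicate c.length (1 : Int) = pvDpA c 0 := by
    rw [replicate_eq_map_range, pvDpA]
    apply List.map_congr_left
    intro k hk
    rcases Nat.eq_zero_or_pos k with h | h
    · subst h; simp [pvH_zero]
    · simp [Nat.not_le.mpr h]
  rw [maxCuboidsLIS]
  simp only [← hc]
  rw [hlen, hdp0]
  have := outerA c (c.length - 1) 0 0 (by omega)
  simp only [Nat.zero_add] at this
  rw [this]
  rfl

-- ---------- port B = peeling = global maximum of pvH ----------
def pvMx (c : List (List Int)) : Int := pvFMax (pvH c) 0 (List.range c.length)

-- the set of indices still remaining after r peeling rounds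
def pvRem (c : List (List Int)) (r : Nat) : List Nat :=
  (List.range c.length).filter (fun i => decide ((r : Int) < pvH c i))

theorem pvMx_nonneg (c : List (List Int)) : 0 ≤ pvMx c := le_pvFMax_init _ _ _

theorem pvMx_le (c : List (List Int)) : pvMx c ≤ (c.length : Int) := by
  rcases pvFMax_cases (pvH c) 0 (List.range c.length) with h | ⟨x, hx, h⟩
  · rw [pvMx, h]; exact Int.natCast_nonneg _
  · have hxn : x < c.length := List.mem_range.mp hx
    have := pvH_le c x
    have hcast : (x : Int) < (c.length : Int) := by exact_mod_cast hxn
    rw [pvMx, h]; omega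

theorem le_pvMx (c : List (List Int)) (i : Nat) (hi : i < c.length) : pvH c i ≤ pvMx c :=
  le_pvFMax_of_mem (pvH c) 0 _ i (List.mem_range.mpr hi)

theorem pvRem_zero (c : List (List Int)) : pvRem c 0 = List.range c.length := by
  rw [pvRem]
  apply List.filter_eq_self.mpr
  intro i _
  have := one_le_pvH c i
  simp only [Int.natCast_zero, decide_eq_true_eq]
  omega

theorem pvRem_nil (c : List (List Int)) (r : Nat) (h : pvMx c ≤ (r : Int)) : pvRem c r = [] := by
  rw [pvRem]
  apply List.filter_eq_nil_iff.mpr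
  intro i hi
  have := le_pvMx c i (List.mem_range.mp hi)
  simp only [decide_eq_true_eq, not_lt]
  omega

theorem pvRem_ne_nil (c : List (List Int)) (r : Nat) (h : (r : Int) < pvMx c) :
    pvRem c r ≠ [] := by
  rcases pvFMax_cases (pvH c) 0 (List.range c.length) with h0 | ⟨x, hx, hEq⟩
  · rw [pvMx, h0] at h
    have : (0 : Int) ≤ (r : Int) := Int.natCast_nonneg r
    omega
  · have hxr : (r : Int) < pvH c x := by rw [pvMx, hEq] at h; exact h
    have hmem : x ∈ pvRem c r :=
      List.mem_filter.mpr ⟨hx, by simp only [decide_eq_true_eq]; exact hxr⟩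
    exact fun hnil => by rw [hnil] at hmem; cases hmem

-- one peeling round sends pvRem r to pvRem (r+1)
theorem peel_step (c : List (List Int)) (r : Nat) :
    (pvRem c r).filter (pvPred c (pvRem c r)) = pvRem c (r + 1) := by
  rw [pvRem, List.filter_filter, pvRem]
  apply List.filter_congr
  intro i hi
  have hin : i < c.length := List.mem_range.mp hi
  have hr0 : (0 : Int) ≤ (r : Int) := Int.natCast_nonneg r
  by_cases h : ((r : Int) + 1 < pvH c i)
  · -- i survives: it has a predecessor of height > r, which lies in pvRem c r
    obtain ⟨j, hji, hcj, hrj⟩ := (pvH_gt_succ_iff c i (r : Int) hr0).mp h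
    have hjmem : j ∈ (List.range c.length).filter (fun i => decide ((r : Int) < pvH c i)) :=
      List.mem_filter.mpr ⟨List.mem_range.mpr (by omega), by simp only [decide_eq_true_eq]; exact hrj⟩
    have hpred : pvPred c ((List.range c.length).filter (fun i => decide ((r : Int) < pvH c i))) i = true := by
      rw [pvPred, List.any_eq_true]
      exact ⟨j, hjmem, by simp [hji, hcj]⟩
    have hgt : (r : Int) < pvH c i := by omega
    simp [hpred, hgt, Nat.cast_add, Nat.cast_one, h]
  · -- i is stripped: no remaining predecessor
    have hpred : pvPred c ((List.range c.length).filter (fun i => decide ((r : Int) < pvH c i))) i = false := by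
      rw [pvPred, List.any_eq_false]
      intro j hj
      have hj' := List.mem_filter.mp hj
      simp only [decide_eq_true_eq] at hj'
      by_cases hji : j < i
      · by_cases hcj : pvCond c j i
        · exact absurd ((pvH_gt_succ_iff c i (r : Int) hr0).mpr ⟨j, hji, hcj, hj'.2⟩) h
        · simp [hcj]
      · simp [hji]
    simp [hpred, Nat.cast_add, Nat.cast_one, h]

theorem peel_eval (c : List (List Int)) :
    ∀ (fuel r : Nat), pvMx c ≤ (r : Int) + fuel →
      pvPeel c fuel (pvRem c r) = max (pvMx c - r) 0 := by
  intro fuel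
  induction fuel with
  | zero =>
    intro r h
    simp only [Nat.cast_zero, add_zero] at h
    rw [pvPeel, max_eq_right (by omega)]
  | succ fuel ih =>
    intro r h
    by_cases hMr : pvMx c ≤ (r : Int)
    · rw [pvPeel, if_pos (by rw [pvRem_nil c r hMr]; rfl), max_eq_right (by omega)]
    · have hlt : (r : Int) < pvMx c := by omega
      rw [pvPeel, if_neg (by simpa [List.isEmpty_iff] using pvRem_ne_nil c r hlt), peel_step,
        ih (r + 1) (by push_cast; push_cast at h; omega)]
      have h1 : max (pvMx c - ((r : Nat) + 1 : Nat)) 0 = pvMx c - (r + 1) := by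
        apply max_eq_left; push_cast; omega
      have h2 : max (pvMx c - (r : Int)) 0 = pvMx c - r := max_eq_left (by omega)
      rw [h1, h2]
      push_cast
      ring

theorem portB_eq (cuboids : List (List Int)) :
    maxCuboidsLIS_alt cuboids = pvMx (PySem.List.sorted cuboids (key := fun r => r.getD 0 0)) := by
  set c := PySem.List.sorted cuboids (key := fun r => r.getD 0 0) with hc
  rw [maxCuboidsLIS_alt]
  simp only [← hc]
  rw [← pvRem_zero c, peel_eval c c.length 0 (by simpa using pvMx_le c)]
  rw [Nat.cast_zero, sub_zero]
  exact max_eq_left (pvMx_nonneg c)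

-- for n ≥ 2 the global maximum of pvH equals A's maximum over indices 1..n-1
theorem pvMx_eq_pvMaxA (c : List (List Int)) (h2 : 2 ≤ c.length) : pvMx c = pvMaxA c := by
  obtain ⟨m, hm⟩ : ∃ m, c.length = m + 1 := ⟨c.length - 1, by omega⟩
  have hrange : List.range c.length = 0 :: List.range' 1 (c.length - 1) := by
    rw [List.range_eq_range', hm, List.range'_succ]
    simp
  rw [pvMx, hrange, pvFMax_cons, pvH_zero]
  have hmax : max (0 : Int) 1 = max 1 0 := by norm_num
  rw [hmax, pvFMax_max]
  have hmem : 1 ∈ List.range' 1 (c.length - 1) := (mem_range1 _ _ _).mpr ⟨le_refl _, by omega⟩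
  have h1 : (1 : Int) ≤ pvMaxA c :=
    le_trans (one_le_pvH c 1) (le_pvFMax_of_mem (pvH c) 0 _ 1 hmem)
  rw [pvMaxA] at h1 ⊢
  exact max_eq_right h1

-- ===== VERDICT (by name: the statement is the Claim_ definition above) =====
theorem maxCuboidsLIS_spec : Claim_equal_maxCuboidsLIS := by
  intro cuboids _ hPre
  show maxCuboidsLIS cuboids = maxCuboidsLIS_alt cuboids
  rw [portA_eq, portB_eq]
  set c := PySem.List.sorted cuboids (key := fun r => r.getD 0 0) with hc
  have hlen : c.length = cuboids.length := PySem.List.length_sorted _ _ _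
  have hne : cuboids.length ≠ 1 := hPre.1
  rcases Nat.eq_zero_or_pos c.length with h0 | hpos
  · rw [pvMaxA, pvMx, h0]
    rfl
  · exact (pvMx_eq_pvMaxA c (by omega)).symm
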